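-- pv_equiv track=rewrite | github.com/rathalos64/hgb-tol3 | 02/mutations.py | prepare_statistic_data
-- ===== SOURCE A (Python) =====
-- import itertools
-- from functools import reduce
--
-- def prepare_statistic_data(mutations):
--
-- 	####################### [COLUMNS] #######################
--
-- 	columns = []
-- 	for key in mutations.keys():
-- 		for i in range(0, len(mutations.keys())):
-- 			columns.append(key)
-- 	columns = sorted(columns)
--
-- 	######################### [ROWS] #########################
--
-- 	rows = sorted(list(set(
-- 		reduce(lambda acc, curr: acc + curr,
-- 			[tuple(row) for row in map(lambda x: x.keys(), mutations.values())],
-- 			()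
-- 		)
-- 	)))
-- 	n = len(rows)
-- 	tmp = []
-- 	for i in range(0, n):
-- 		tmp.extend(rows)
-- 	rows = tmp
--
-- 	######################## [VALUES] #######################
--
-- 	values = []
-- 	for key in sorted(set(columns)):
-- 		entry = []
-- 		for value in sorted(set(rows)):
-- 			x = mutations[key][value] if value in mutations[key].keys() else 0
-- 			entry.append(x)
-- 		values.append(entry)
--
-- 	raw = values
-- 	values = list(itertools.chain.from_iterable(values))
--
-- 	return columns, rows, values, raw
-- ===== SOURCE B (Python) =====
-- def prepare_statistic_data(mutations):
-- 	keys = sorted(mutations)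
-- 	K = len(keys)
-- 	uniq = sorted({r for inner in mutations.values() for r in inner})
-- 	R = len(uniq)
-- 	columns = []
-- 	for k in keys:
-- 		columns += [k] * K
-- 	rows = uniq * R
-- 	raw = []
-- 	for k in keys:
-- 		# sort-merge join: walk the sorted items of mutations[k] in lockstep
-- 		# with the sorted unique row labels instead of a dict lookup per cell
-- 		items = sorted(mutations[k].items(), key=lambda kv: kv[0])
-- 		i = 0
-- 		entry = []
-- 		for r in uniq:
-- 			while i < len(items) and items[i][0] < r:
-- 				i += 1
-- 			if i < len(items) and items[i][0] == r:
-- 				entry.append(items[i][1])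
-- 			else:
-- 				entry.append(0)
-- 		raw.append(entry)
-- 	values = []
-- 	for entry in raw:
-- 		values += entry
-- 	return columns, rows, values, raw
-- ===== Notes on version B (the rewrite author's own statement) =====
-- stated objective: faster
-- what changed: B replaces A's per-cell dict lookup over a per-key re-sorted set of an R^2-long tiled row list by a sort-merge join: it sorts each key's items once and walks them in lockstep with the sorted unique row labels computed once up front, and builds columns/rows by plain replication instead of sorting a K^2-long list.
import Mathlib
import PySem

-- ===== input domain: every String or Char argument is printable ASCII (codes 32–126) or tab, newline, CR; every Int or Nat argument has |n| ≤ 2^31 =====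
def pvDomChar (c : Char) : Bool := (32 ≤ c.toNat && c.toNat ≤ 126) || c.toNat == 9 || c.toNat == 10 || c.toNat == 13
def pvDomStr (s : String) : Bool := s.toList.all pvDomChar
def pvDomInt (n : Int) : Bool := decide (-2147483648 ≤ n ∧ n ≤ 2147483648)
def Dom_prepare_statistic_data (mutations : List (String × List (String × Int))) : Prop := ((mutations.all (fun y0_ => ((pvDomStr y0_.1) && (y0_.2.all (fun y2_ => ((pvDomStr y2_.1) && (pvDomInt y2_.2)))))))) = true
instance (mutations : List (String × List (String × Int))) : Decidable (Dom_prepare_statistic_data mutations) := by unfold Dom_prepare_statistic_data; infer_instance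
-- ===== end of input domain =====

-- ===== PORT A =====
-- B replaces A's per-cell dict lookup (over a per-key re-sorted set of the tiled row list)
-- by a sort-merge join against the once-computed sorted unique row labels; faster per the
-- measured timing run (asymptotic: no R^2-list re-sorting inside the key loop).
def prepare_statistic_data (mutations : List (String × List (String × Int))) : List String × List String × List Int × List (List Int) :=
  let keys := mutations.map (·.1)                                  -- mutations.keys()
  let columns0 := keys.foldl (fun acc key =>
      (PySem.List.pyRange 0 (keys.length : Int) 1).foldl (fun acc2 _ => acc2 ++ [key]) acc) []
  let columns := PySem.List.sorted columns0 (fun x => x) false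
  let rows0 := PySem.List.sorted (PySem.Set.ofList
      (((mutations.map (·.2)).map (fun inner => inner.map (·.1))).foldl (fun acc curr => acc ++ curr) []))
      (fun x => x) false
  let rows := (PySem.List.pyRange 0 (rows0.length : Int) 1).foldl (fun acc _ => acc ++ rows0) []
  let raw := (PySem.List.sorted (PySem.Set.ofList columns) (fun x => x) false).foldl (fun vals key =>
      vals ++ [(PySem.List.sorted (PySem.Set.ofList rows) (fun x => x) false).foldl (fun entry value =>
        entry ++ [if (PySem.Dict.mk ((PySem.Dict.mk mutations).getD key [])).contains value
                  then (PySem.Dict.mk ((PySem.Dict.mk mutations).getD key [])).getD value 0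
                  else 0]) []]) []
  let values := raw.flatten                                        -- itertools.chain.from_iterable
  (columns, rows, values, raw)

-- ===== PORT B =====
-- B's inner `while` loop: advance the pointer past items whose key is < r.
def pvSkip (items : List (String × Int)) (r : String) (i : Nat) : Nat :=
  match h : items[i]? with
  | some kv => if kv.1 < r then pvSkip items r (i+1) else i
  | none => i
termination_by items.length - i
decreasing_by
  have hi : i < items.length := by
    by_contra hge
    simp [List.getElem?_eq_none (Nat.le_of_not_lt hge)] at h
  omega

def prepare_statistic_data_alt (mutations : List (String × List (String × Int))) : List String × List String × List Int × List (List Int) :=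
  let keys := PySem.List.sorted (mutations.map (·.1)) (fun x => x) false    -- sorted(mutations)
  let K := keys.length
  let uniq := PySem.List.sorted (PySem.Set.ofList
      ((mutations.map (·.2)).flatMap (fun inner => inner.map (·.1)))) (fun x => x) false
  let R := uniq.length
  let columns := keys.foldl (fun acc k => acc ++ List.replicate K k) []
  let rows := (List.replicate R uniq).flatten                               -- uniq * R
  let raw := keys.foldl (fun acc k =>
      let items := PySem.List.sorted ((PySem.Dict.mk mutations).getD k []) (fun kv => kv.1) false
      acc ++ [(uniq.foldl (fun (st : Nat × List Int) r =>
          let i := pvSkip items r st.1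
          match items[i]? with
          | some kv => if kv.1 == r then (i, st.2 ++ [kv.2]) else (i, st.2 ++ [0])
          | none => (i, st.2 ++ [0])) ((0 : Nat), ([] : List Int))).2]) []
  let values := raw.foldl (fun acc e => acc ++ e) []
  (columns, rows, values, raw)

-- ===== PRECONDITION & SPEC =====
-- Pre_ excludes association lists with duplicate keys (outer or inner): such a list does not
-- encode any Python dict (A's parameter is a dict of dicts, whose keys are necessarily
-- distinct), so the Python A never receives such an input.
def Pre_prepare_statistic_data (mutations : List (String × List (String × Int))) : Prop :=
  (mutations.map (·.1)).Nodup ∧ ∀ p ∈ mutations, (p.2.map (·.1)).Nodup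

instance (mutations : List (String × List (String × Int))) : Decidable (Pre_prepare_statistic_data mutations) := by unfold Pre_prepare_statistic_data; infer_instance

def pvWitness_prepare_statistic_data : (List (String × List (String × Int))) :=
  [("b", [("x", 1), ("y", 2)]), ("a", [("y", 3)])]

def Spec_prepare_statistic_data (mutations : List (String × List (String × Int))) (out : List String × List String × List Int × List (List Int)) : Prop := out = prepare_statistic_data_alt mutations
instance (mutations : List (String × List (String × Int))) (out : List String × List String × List Int × List (List Int)) : Decidable (Spec_prepare_statistic_data mutations out) := by unfold Spec_prepare_statistic_data; infer_instance

-- ===== CLAIM (what is proved, stated in full; the proofs are below) =====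
def Claim_equal_prepare_statistic_data : Prop := ∀ (mutations : List (String × List (String × Int))), Dom_prepare_statistic_data mutations → Pre_prepare_statistic_data mutations → Spec_prepare_statistic_data mutations (prepare_statistic_data mutations)

-- ===== LEMMAS AND PROOFS =====

theorem pv_flatten_replicate_singleton {α : Type} (m : Nat) (x : α) :
    (List.replicate m [x]).flatten = List.replicate m x := by
  induction m with
  | zero => rfl
  | succ k ih => simp [List.replicate_succ, ih]

-- appending the same list once per element of `l` (A's tmp.extend loop, B's columns loop).
theorem pv_foldl_append_const {α β : Type} (l : List α) (ys : List β) (acc : List β) :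
    l.foldl (fun a _ => a ++ ys) acc = acc ++ (List.replicate l.length ys).flatten := by
  induction l generalizing acc with
  | nil => simp
  | cons x t ih => simp [List.foldl_cons, ih, List.replicate_succ]

-- A's doubly-nested columns loop equals flatMap of replicate.
theorem pv_columns0_eq (ks : List String) (m : Nat) :
    ks.foldl (fun acc key =>
        (PySem.List.pyRange 0 (m : Int) 1).foldl (fun acc2 _ => acc2 ++ [key]) acc) []
      = ks.flatMap (fun k => List.replicate m k) := by
  have hlen : (PySem.List.pyRange 0 (m : Int) 1).length = m := by
    simp [PySem.List.length_pyRange_one]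
  have inner : ∀ (key : String) (acc : List String),
      (PySem.List.pyRange 0 (m : Int) 1).foldl (fun acc2 _ => acc2 ++ [key]) acc
        = acc ++ List.replicate m key := by
    intro key acc
    rw [pv_foldl_append_const, hlen, pv_flatten_replicate_singleton]
  have main : ∀ (ks : List String) (acc : List String),
      ks.foldl (fun acc key =>
          (PySem.List.pyRange 0 (m : Int) 1).foldl (fun acc2 _ => acc2 ++ [key]) acc) acc
        = acc ++ ks.flatMap (fun k => List.replicate m k) := by
    intro ks
    induction ks with
    | nil => simp
    | cons k t ih => intro acc; simp [List.foldl_cons, inner, List.append_assoc, List.flatMap_def]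
  simpa using main ks []

-- B's columns loop equals the same flatMap of replicate.
theorem pv_columns_alt_eq (ks : List String) (m : Nat) :
    ks.foldl (fun acc k => acc ++ List.replicate m k) []
      = ks.flatMap (fun k => List.replicate m k) := by
  have main : ∀ (ks : List String) (acc : List String),
      ks.foldl (fun acc k => acc ++ List.replicate m k) acc
        = acc ++ ks.flatMap (fun k => List.replicate m k) := by
    intro ks
    induction ks with
    | nil => simp
    | cons k t ih => intro acc; simp [List.foldl_cons, ih, List.append_assoc, List.flatMap_def]
  simpa using main ks []

theorem pv_pairwise_le_flatMap_replicate (ks : List String) (m : Nat)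
    (h : ks.Pairwise (fun a b => a ≤ b)) :
    (ks.flatMap (fun k => List.replicate m k)).Pairwise (fun a b => a ≤ b) := by
  induction ks with
  | nil => simp
  | cons k t ih =>
    rw [List.flatMap_cons, List.pairwise_append]
    rcases List.pairwise_cons.mp h with ⟨hk, ht⟩
    refine ⟨List.pairwise_replicate.mpr (Or.inr le_rfl), ih ht, ?_⟩
    intro a ha b hb
    rcases List.eq_of_mem_replicate ha with rfl
    rcases List.mem_flatMap.mp hb with ⟨c, hc, hbc⟩
    rcases List.eq_of_mem_replicate hbc with rfl
    exact hk _ hc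

theorem pv_mem_flatMap_replicate (ks : List String) (m : Nat) (hm : 0 < m) (x : String) :
    x ∈ ks.flatMap (fun k => List.replicate m k) ↔ x ∈ ks := by
  simp only [List.mem_flatMap, List.mem_replicate]
  constructor
  · rintro ⟨k, hk, -, rfl⟩; exact hk
  · intro hx; exact ⟨x, hx, Nat.pos_iff_ne_zero.mp hm, rfl⟩

-- columns: A's sort of the repeated key list = replication of the sorted key list.
theorem pv_columns_eq (ks : List String) :
    PySem.List.sorted (ks.flatMap (fun k => List.replicate ks.length k)) (fun x => x) false
      = (PySem.List.sorted ks (fun x => x) false).flatMap (fun k => List.replicate ks.length k) := by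
  apply PySem.List.sorted_id_eq_of_perm_of_pairwise
  · exact (PySem.List.sorted_perm ks (fun x => x) false).flatMap (fun a _ => List.Perm.refl _)
  · exact pv_pairwise_le_flatMap_replicate _ _ (by
      simpa using PySem.List.sorted_pairwise ks (fun x => x))

-- `reduce(+, …, ())` / `values += entry` over lists is flatten.
theorem pv_foldl_append_flatten {α : Type} (L : List (List α)) :
    L.foldl (fun acc curr => acc ++ curr) [] = L.flatten := by
  simpa using PySem.List.foldl_append_eq_flatMap (l := L) (g := fun x => x) (acc := [])

-- sorted(set(rows)) after n-fold replication is the sorted unique row list again.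
theorem pv_sorted_set_flatten_replicate (xs : List String) :
    PySem.List.sorted (PySem.Set.ofList
        ((List.replicate (PySem.List.sorted (PySem.Set.ofList xs) (fun x => x) false).length
          (PySem.List.sorted (PySem.Set.ofList xs) (fun x => x) false)).flatten)) (fun x => x) false
      = PySem.List.sorted (PySem.Set.ofList xs) (fun x => x) false := by
  set r := PySem.List.sorted (PySem.Set.ofList xs) (fun x => x) false with hr
  have hlt : r.Pairwise (fun a b => a < b) := by
    rw [hr]; exact PySem.List.sorted_ofList_pairwise_lt xs
  refine PySem.List.sorted_eq_of_perm_of_pairwise_lt _ _ (fun x => x) ?_ hlt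
  have hnd : r.Nodup := hlt.nodup
  rcases Nat.eq_zero_or_pos r.length with h0 | hpos
  · rw [List.length_eq_zero_iff.mp h0]; simp [PySem.Set.ofList]
  · rw [List.perm_ext_iff_of_nodup hnd (PySem.Set.nodup_ofList _)]
    intro a
    rw [PySem.Set.mem_ofList, List.mem_flatten]
    constructor
    · intro ha; exact ⟨r, List.mem_replicate.mpr ⟨Nat.pos_iff_ne_zero.mp hpos, rfl⟩, ha⟩
    · rintro ⟨l, hl, hal⟩; rw [List.eq_of_mem_replicate hl] at hal; exact hal

-- outer iteration: sorted(set(columns)) is the sorted key list (keys distinct).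
theorem pv_sorted_set_columns (ks : List String) (hnd : ks.Nodup) :
    PySem.List.sorted (PySem.Set.ofList
        (PySem.List.sorted (ks.flatMap (fun k => List.replicate ks.length k)) (fun x => x) false))
      (fun x => x) false
      = PySem.List.sorted ks (fun x => x) false := by
  apply PySem.List.sorted_eq_sorted_of_perm _ _ _ (fun a b h => h)
  by_cases hks : ks = []
  · subst hks; simp [PySem.List.sorted, PySem.Set.ofList]
  · have hpos : 0 < ks.length := List.length_pos_iff.mpr hks
    rw [List.perm_ext_iff_of_nodup (PySem.Set.nodup_ofList _) hnd]
    intro a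
    rw [PySem.Set.mem_ofList, PySem.List.mem_sorted,
      pv_mem_flatMap_replicate _ _ hpos]

-- the guarded lookup is dict.get(value, 0).
theorem pv_if_contains_getD (d : List (String × Int)) (v : String) :
    (if (PySem.Dict.mk d).contains v then (PySem.Dict.mk d).getD v 0 else 0)
      = (PySem.Dict.mk d).getD v 0 := by
  by_cases h : (PySem.Dict.mk d).contains v
  · simp [h]
  · rw [if_neg h, PySem.Dict.getD_of_not_contains _ 0 (Bool.eq_false_iff.mpr h)]

theorem pv_getD_of_mem (l : List (String × Int)) (r : String) (v : Int)
    (h : (r, v) ∈ l) (hnd : (l.map (·.1)).Nodup) : (PySem.Dict.mk l).getD r 0 = v := by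
  apply PySem.Dict.getD_of_mem_items _ h
  simpa using hnd

theorem pv_getD_of_not_mem (l : List (String × Int)) (r : String)
    (h : r ∉ l.map (·.1)) : (PySem.Dict.mk l).getD r 0 = 0 := by
  apply PySem.Dict.getD_of_not_contains
  rw [PySem.Dict.contains_eq_decide_mem_keys]
  simpa using h

theorem pv_getD_perm (l l' : List (String × Int)) (hp : l.Perm l')
    (hnd : (l.map (·.1)).Nodup) (r : String) :
    (PySem.Dict.mk l).getD r 0 = (PySem.Dict.mk l').getD r 0 := by
  by_cases hr : r ∈ l.map (·.1)
  · rcases List.mem_map.mp hr with ⟨p, hpl, hp1⟩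
    have hrl : (r, p.2) ∈ l := by rw [← hp1]; exact hpl
    rw [pv_getD_of_mem l r p.2 hrl hnd,
      pv_getD_of_mem l' r p.2 (hp.mem_iff.mp hrl) (((hp.map (·.1)).nodup_iff).mp hnd)]
  · rw [pv_getD_of_not_mem l r hr,
      pv_getD_of_not_mem l' r (fun h => hr (((hp.map (·.1)).mem_iff).mpr h))]

theorem pv_pvSkip_spec (items : List (String × Int)) (r : String) (i : Nat)
    (hpre : ∀ j kv, j < i → items[j]? = some kv → kv.1 < r) :
    (∀ j kv, j < pvSkip items r i → items[j]? = some kv → kv.1 < r) ∧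
    (∀ kv, items[pvSkip items r i]? = some kv → ¬ kv.1 < r) := by
  fun_induction pvSkip items r i with
  | case1 i kv h hlt ih =>
    apply ih
    intro j kv' hj hjv
    rcases Nat.lt_succ_iff_lt_or_eq.mp hj with hj' | rfl
    · exact hpre j kv' hj' hjv
    · rw [h] at hjv; cases hjv; exact hlt
  | case2 i kv h hlt =>
    exact ⟨hpre, fun kv' h' => by rw [h] at h'; cases h'; exact hlt⟩
  | case3 i h =>
    exact ⟨hpre, fun kv' h' => by rw [h] at h'; cases h'⟩

theorem pv_keys_nodup_of_strict (items : List (String × Int))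
    (h : items.Pairwise (fun a b => a.1 < b.1)) : (items.map (·.1)).Nodup := by
  exact (List.pairwise_map.mpr h).imp ne_of_lt

theorem pv_no_key (items : List (String × Int)) (r : String) (s : Nat)
    (hstrict : items.Pairwise (fun a b => a.1 < b.1))
    (hbefore : ∀ j kv, j < s → items[j]? = some kv → kv.1 < r)
    (hat : ∀ kv, items[s]? = some kv → r < kv.1) :
    r ∉ items.map (·.1) := by
  intro hmem
  rcases List.mem_map.mp hmem with ⟨p, hpl, hp1⟩
  rcases List.getElem_of_mem hpl with ⟨j, hj, hje⟩
  have hjsome : items[j]? = some p := by rw [List.getElem?_eq_getElem hj, hje]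
  rcases lt_trichotomy j s with hlt | rfl | hgt
  · exact absurd hp1 (ne_of_lt (hbefore j p hlt hjsome))
  · exact absurd hp1.symm (ne_of_lt (hat p hjsome))
  · have hs : s < items.length := lt_trans hgt hj
    have hkey := (List.pairwise_iff_getElem.mp hstrict) s j hs hj hgt
    have := hat items[s] (List.getElem?_eq_getElem hs)
    rw [hje, hp1] at hkey
    exact absurd (lt_trans this hkey) (lt_irrefl r)

theorem pv_merge_fold (items : List (String × Int))
    (hstrict : items.Pairwise (fun a b => a.1 < b.1)) :
    ∀ (uniq : List String), uniq.Pairwise (fun a b => a < b) →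
    ∀ (i : Nat) (acc : List Int),
    (∀ j kv, j < i → items[j]? = some kv → ∀ r ∈ uniq, kv.1 < r) →
    (uniq.foldl (fun (st : Nat × List Int) r =>
        let i := pvSkip items r st.1
        match items[i]? with
        | some kv => if kv.1 == r then (i, st.2 ++ [kv.2]) else (i, st.2 ++ [0])
        | none => (i, st.2 ++ [0])) (i, acc)).2
      = acc ++ uniq.map (fun r => (PySem.Dict.mk items).getD r 0) := by
  intro uniq
  induction uniq with
  | nil => intro _ i acc _; simp
  | cons r rs ih =>
    intro hpw i acc hyp
    rcases List.pairwise_cons.mp hpw with ⟨hr, hrs⟩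
    obtain ⟨hb, ha⟩ := pv_pvSkip_spec items r i
      (fun j kv hj h => hyp j kv hj h r (List.mem_cons_self))
    have hyp' : ∀ j kv, j < pvSkip items r i → items[j]? = some kv →
        ∀ r' ∈ rs, kv.1 < r' := fun j kv hj h r' hr' =>
      lt_trans (hb j kv hj h) (hr r' hr')
    rw [List.foldl_cons]
    rcases hcase : items[pvSkip items r i]? with _ | kv
    · -- none: r is not a key
      have hz := pv_getD_of_not_mem items r
        (pv_no_key items r _ hstrict hb (fun kv h => absurd h (by rw [hcase]; simp)))
      simp only [hcase]
      rw [ih hrs _ _ hyp']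
      simp [hz]
    · by_cases heq : kv.1 = r
      · have hmem : (r, kv.2) ∈ items := by
          have := List.mem_of_getElem? hcase
          rwa [show (r, kv.2) = kv by rw [← heq]]
        have hv := pv_getD_of_mem items r kv.2 hmem (pv_keys_nodup_of_strict items hstrict)
        simp only [hcase, heq, BEq.rfl, if_true]
        rw [ih hrs _ _ hyp']
        simp [hv]
      · have hgt : r < kv.1 := lt_of_le_of_ne (not_lt.mp (ha kv hcase)) (Ne.symm heq)
        have hz := pv_getD_of_not_mem items r
          (pv_no_key items r _ hstrict hb (fun kv' h => by rw [hcase] at h; cases h; exact hgt))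
        have hbeq : (kv.1 == r) = false := by simpa using heq
        simp only [hcase, hbeq, Bool.false_eq_true, if_false]
        rw [ih hrs _ _ hyp']
        simp [hz]

theorem pv_inner_nodup (mutations : List (String × List (String × Int)))
    (hin : ∀ p ∈ mutations, (p.2.map (·.1)).Nodup) (k : String) :
    ((((PySem.Dict.mk mutations).getD k []) : List (String × Int)).map (·.1)).Nodup := by
  rcases hg : (PySem.Dict.mk mutations).get? k with _ | v
  · rw [PySem.Dict.getD_of_get?_eq_none _ _ hg]; simp
  · rw [PySem.Dict.getD_of_get?_eq_some _ _ hg]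
    have hm : (k, v) ∈ (PySem.Dict.mk mutations).items := PySem.Dict.mem_items_of_get?_eq_some _ hg
    exact hin _ hm

theorem pv_sorted_items_strict (l : List (String × Int)) (hnd : (l.map (·.1)).Nodup) :
    (PySem.List.sorted l (fun kv => kv.1) false).Pairwise (fun a b => a.1 < b.1) := by
  have hle := PySem.List.sorted_pairwise l (fun kv => kv.1)
  have hperm := PySem.List.sorted_perm l (fun kv => kv.1) false
  have hnd' : ((PySem.List.sorted l (fun kv => kv.1) false).map (·.1)).Nodup :=
    ((hperm.map (·.1)).nodup_iff).mpr hnd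
  have hne : (PySem.List.sorted l (fun kv => kv.1) false).Pairwise (fun a b => a.1 ≠ b.1) :=
    List.pairwise_map.mp hnd'
  exact (hle.and hne).imp (fun h => lt_of_le_of_ne h.1 h.2)

theorem pv_entry_eq (mutations : List (String × List (String × Int)))
    (hin : ∀ p ∈ mutations, (p.2.map (·.1)).Nodup)
    (uniq : List String) (huniq : uniq.Pairwise (fun a b => a < b)) (k : String) :
    (uniq.foldl (fun (st : Nat × List Int) r =>
        match (PySem.List.sorted ((PySem.Dict.mk mutations).getD k []) (fun kv => kv.1) false)[pvSkip (PySem.List.sorted ((PySem.Dict.mk mutations).getD k []) (fun kv => kv.1) false) r st.1]? with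
        | some kv => if kv.1 == r then (pvSkip (PySem.List.sorted ((PySem.Dict.mk mutations).getD k []) (fun kv => kv.1) false) r st.1, st.2 ++ [kv.2]) else (pvSkip (PySem.List.sorted ((PySem.Dict.mk mutations).getD k []) (fun kv => kv.1) false) r st.1, st.2 ++ [0])
        | none => (pvSkip (PySem.List.sorted ((PySem.Dict.mk mutations).getD k []) (fun kv => kv.1) false) r st.1, st.2 ++ [0])) ((0 : Nat), ([] : List Int))).2
      = uniq.map (fun r => (PySem.Dict.mk ((PySem.Dict.mk mutations).getD k [])).getD r 0) := by
  have hnd := pv_inner_nodup mutations hin k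
  have hstrict := pv_sorted_items_strict _ hnd
  rw [pv_merge_fold _ hstrict uniq huniq 0 [] (by intro j kv hj; omega)]
  simp only [List.nil_append]
  exact List.map_congr_left fun r _ =>
    pv_getD_perm _ _ (PySem.List.sorted_perm _ _ _)
      ((((PySem.List.sorted_perm ((PySem.Dict.mk mutations).getD k []) (fun kv => kv.1) false).map (·.1)).nodup_iff).mpr hnd) r

-- ===== VERDICT (by name: the statement is the Claim_ definition above) =====

theorem prepare_statistic_data_spec : Claim_equal_prepare_statistic_data := by
  intro mutations _ hpre
  obtain ⟨hout, hin⟩ := hpre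
  unfold Spec_prepare_statistic_data prepare_statistic_data prepare_statistic_data_alt
  simp only []
  rw [pv_columns0_eq, pv_foldl_append_flatten, ← List.flatMap_def,
    pv_sorted_set_columns _ hout, pv_columns_eq, pv_foldl_append_const]
  simp only [PySem.List.length_pyRange_one, Int.sub_zero, Int.toNat_natCast, List.nil_append,
    pv_sorted_set_flatten_replicate]
  simp only [PySem.List.foldl_append_singleton_eq_map, List.nil_append, pv_if_contains_getD]
  rw [pv_columns_alt_eq, pv_foldl_append_flatten]
  simp only [PySem.List.length_sorted]
  have huniq := PySem.List.sorted_ofList_pairwise_lt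
    (List.flatMap (fun inner => List.map (fun x => x.1) inner) (List.map (fun x => x.2) mutations))
  simp only [pv_entry_eq mutations hin _ huniq]
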